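-- pv_equiv track=rewrite | github.com/dylanapplegate/advent | src/2025/day06/python/solution.py | decode_vertical_num
-- ===== SOURCE A (Python) =====
-- import math
--
-- def calculate(nums: list[int], sign: str) -> int:
--     if sign == "*":
--         return math.prod(nums)
--     return sum(nums)
--
-- def decode_vertical_num(column_segments: tuple[str, ...]) -> int:
--     segments = column_segments[:-1]
--     right_to_left_nums = []
--
--     max_len = max(len(s) for s in segments)
--
--     for offset in range(1, max_len + 1):
--         chars = [
--             s[-offset] for s in segments if len(s) >= offset and s[-offset].strip()
--         ]
--
--         string_num = "".join(chars).strip()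
--
--         if string_num:
--             right_to_left_nums.append(int(string_num))
--
--     return calculate(right_to_left_nums, column_segments[-1])
-- ===== SOURCE B (Python) =====
-- import math
--
--
-- def decode_vertical_num(column_segments):
--     *segments, sign = column_segments
--     # one pass over all characters: inverted index column-offset -> chars (top to bottom)
--     pairs = [
--         (len(s) - i, c) for s in segments for i, c in enumerate(s) if c.strip()
--     ]
--     cols = {}
--     for off, c in pairs:
--         cols.setdefault(off, []).append(c)
--     nums = [int("".join(chars)) for chars in cols.values()]
--     return math.prod(nums) if sign == "*" else sum(nums)
-- ===== Notes on version B (the rewrite author's own statement) =====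
-- stated objective: alternative
-- what changed: B replaces A's per-offset nested scans over the segments by a single pass that flattens every non-space character into an (offset, char) pair and groups the pairs in a dict (an inverted index built once, so the inner per-offset scan disappears); sum/product commutativity makes the dict's first-seen column order equivalent to A's right-to-left order.
import Mathlib
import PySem

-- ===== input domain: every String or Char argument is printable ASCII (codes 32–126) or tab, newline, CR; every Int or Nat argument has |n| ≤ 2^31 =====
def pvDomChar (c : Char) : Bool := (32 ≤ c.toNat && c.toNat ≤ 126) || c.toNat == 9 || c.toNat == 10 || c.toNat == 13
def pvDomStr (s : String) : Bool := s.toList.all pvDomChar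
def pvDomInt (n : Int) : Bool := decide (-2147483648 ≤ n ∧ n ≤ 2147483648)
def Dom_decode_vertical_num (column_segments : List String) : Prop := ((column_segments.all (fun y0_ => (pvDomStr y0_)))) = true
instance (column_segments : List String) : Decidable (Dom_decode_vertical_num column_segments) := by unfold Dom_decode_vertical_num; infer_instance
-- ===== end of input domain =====

-- B flattens every non-space character into an (offset, char) pair in one pass and groups the
-- pairs in a dict keyed by the offset (an inverted index), instead of A's per-offset scans over
-- all segments; sum/product are commutative, so the column order is irrelevant (objective:
-- alternative decomposition, same cost).

-- ===== PORT A =====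
def pvCalculate (nums : List Int) (sign : String) : Int :=
  if sign = "*" then nums.prod else nums.sum

def decode_vertical_num (column_segments : List String) : Int :=
  let segments := PySem.List.slice column_segments none (some (-1))
  -- max() on an empty sequence raises ValueError; Pre_ excludes column_segments shorter than 2
  let max_len : Int := (PySem.List.max? (segments.map (fun s => PySem.Str.len s)) id).getD 0
  let nums : List Int := (PySem.List.pyRange 1 (max_len + 1) 1).foldl (fun acc offset =>
      let chars : List Char := segments.foldl (fun a s =>
          if decide (offset ≤ PySem.Str.len s) && !(PySem.Chars.strip [(PySem.Str.pyGet? s (-offset)).getD ' ']).isEmpty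
          then a ++ [(PySem.Str.pyGet? s (-offset)).getD ' '] else a) []
      let string_num := PySem.Chars.strip chars
      -- int() raises ValueError on a non-integer column string; Pre_ excludes those inputs
      if !string_num.isEmpty then acc ++ [(PySem.Int.ofChars? string_num).getD 0] else acc) []
  pvCalculate nums ((PySem.List.pyGet? column_segments (-1)).getD "")

-- ===== PORT B =====
def decode_vertical_num_alt (column_segments : List String) : Int :=
  -- `*segments, sign = column_segments` raises ValueError on []; Pre_ excludes lists shorter than 2
  let segments := column_segments.dropLast
  let sign := (PySem.List.pyGet? column_segments (-1)).getD ""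
  -- the flat comprehension: one (len(s)-i, c) pair per non-space character
  let pairs : List (Int × Char) := segments.flatMap (fun s =>
    (PySem.List.enumerate s.toList 0).filterMap (fun ic =>
      if !(PySem.Chars.strip [ic.2]).isEmpty then some (PySem.Str.len s - ic.1, ic.2) else none))
  -- cols.setdefault(off, []).append(c)  ≡  cols[off] = cols.get(off, []) + [c]
  let cols := pairs.foldl (fun d p => d.modify p.1 [] (fun v => v ++ [p.2]))
      (PySem.Dict.empty : PySem.Dict Int (List Char))
  -- int() raises ValueError on a non-integer column string; Pre_ excludes those inputs
  let nums := cols.values.map (fun chars => (PySem.Int.ofChars? chars).getD 0)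
  if sign = "*" then nums.prod else nums.sum

-- ===== PRECONDITION & SPEC =====
-- helpers for Pre_ (input shapes only; they do not use either port)
def pvSegsL (cs : List String) : List (List Char) := cs.dropLast.map String.toList
def pvMaxLen (cs : List String) : Nat :=
  ((PySem.List.max? ((pvSegsL cs).map (fun s => (s.length : Int))) id).getD 0).toNat
def pvColumn (segs : List (List Char)) (off : Nat) : List Char :=
  (segs.filter (fun s => decide (off ≤ s.length) && !PySem.Chars.isspace (s.getD (s.length - off) ' '))).map
    (fun s => s.getD (s.length - off) ' ')

-- Pre_ excludes exactly the inputs on which A raises: fewer than two segments (max() of an empty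
-- sequence raises ValueError) and inputs with a non-empty vertical column string that int() cannot
-- parse (ValueError).
def Pre_decode_vertical_num (column_segments : List String) : Prop :=
  2 ≤ column_segments.length ∧
    ∀ off < pvMaxLen column_segments + 1, 1 ≤ off →
      pvColumn (pvSegsL column_segments) off ≠ [] →
        (PySem.Int.ofChars? (pvColumn (pvSegsL column_segments) off)).isSome = true
instance (column_segments : List String) : Decidable (Pre_decode_vertical_num column_segments) := by
  unfold Pre_decode_vertical_num; infer_instance

def pvWitness_decode_vertical_num : List String := ["12", "34", "+"]

def Spec_decode_vertical_num (column_segments : List String) (out : Int) : Prop := out = decode_vertical_num_alt column_segments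
instance (column_segments : List String) (out : Int) : Decidable (Spec_decode_vertical_num column_segments out) := by unfold Spec_decode_vertical_num; infer_instance

-- ===== CLAIM (what is proved, stated in full; the proofs are below) =====
def Claim_equal_decode_vertical_num : Prop := ∀ (column_segments : List String), Dom_decode_vertical_num column_segments → Pre_decode_vertical_num column_segments → Spec_decode_vertical_num column_segments (decode_vertical_num column_segments)

-- ===== LEMMAS AND PROOFS =====

-- the (optional) number contributed by one vertical column
def pvG (segs : List (List Char)) (off : Nat) : Option Int :=
  if (pvColumn segs off).isEmpty then none
  else some ((PySem.Int.ofChars? (pvColumn segs off)).getD 0)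

def pvSign (cs : List String) : String := (PySem.List.pyGet? cs (-1)).getD ""

theorem pv_strip_singleton_isEmpty (c : Char) :
    (PySem.Chars.strip [c]).isEmpty = PySem.Chars.isspace c := by
  by_cases h : PySem.Chars.isspace c = true <;>
    simp [PySem.Chars.strip, PySem.Chars.lstrip, PySem.Chars.rstrip, List.dropWhile, h]

theorem pv_strip_eq_self (l : List Char) (h : ∀ c ∈ l, PySem.Chars.isspace c = false) :
    PySem.Chars.strip l = l := by
  have h1 : List.dropWhile PySem.Chars.isspace l = l := by
    rw [List.dropWhile_eq_self_iff]
    intro hl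
    simp [h _ (List.getElem_mem hl)]
  have h2 : List.dropWhile PySem.Chars.isspace l.reverse = l.reverse := by
    rw [List.dropWhile_eq_self_iff]
    intro hl
    simp only [List.getElem_reverse]
    simp [h _ (List.getElem_mem _)]
  simp [PySem.Chars.strip, PySem.Chars.lstrip, PySem.Chars.rstrip, h1, h2]

theorem pv_max?_isSome {α κ : Type} [LT κ] [DecidableLT κ] (xs : List α) (key : α → κ)
    (h : xs ≠ []) : (PySem.List.max? xs key).isSome = true := by
  have aux : ∀ (l : List α) (a : α),
      (List.foldl (fun acc x => match acc with
        | none => some x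
        | some m => if key m < key x then some x else some m) (some a) l).isSome = true := by
    intro l
    induction l with
    | nil => simp
    | cons y ys ih => intro a; simp only [List.foldl_cons]; split <;> apply ih
  cases xs with
  | nil => exact absurd rfl h
  | cons x xs => simpa [PySem.List.max?] using aux xs x

theorem pv_filterMap_ite {α β : Type} (l : List α) (p : α → Bool) (f : α → β) :
    l.filterMap (fun x => if p x then some (f x) else none) = (l.filter p).map f := by
  induction l with
  | nil => rfl
  | cons x xs ih => by_cases h : p x <;> simp [h, ih]

theorem pv_filter_map_eq_flatMap {α β : Type} (l : List α) (p : α → Bool) (f : α → β) :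
    (l.filter p).map f = l.flatMap (fun x => if p x then [f x] else []) := by
  induction l with
  | nil => rfl
  | cons x xs ih => by_cases h : p x <;> simp [h, ih]

-- facts about the shared max_len computation, under 2 ≤ |cs|
theorem pv_maxLen_facts (cs : List String) (h2 : 2 ≤ cs.length) :
    (PySem.List.max? ((pvSegsL cs).map (fun s => (s.length : Int))) id).getD 0
        = ((pvMaxLen cs : Nat) : Int)
      ∧ ∀ s ∈ pvSegsL cs, s.length ≤ pvMaxLen cs := by
  have hne : (pvSegsL cs).map (fun s => (s.length : Int)) ≠ [] := by
    simp only [pvSegsL, List.map_map, ne_eq, List.map_eq_nil_iff]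
    intro hdl
    have : cs.dropLast.length = cs.length - 1 := List.length_dropLast
    rw [hdl] at this
    simp at this
    omega
  obtain ⟨v, hv⟩ := Option.isSome_iff_exists.mp (pv_max?_isSome _ id hne)
  have hmem := PySem.List.max?_mem hv
  obtain ⟨s0, _, hs0⟩ := List.mem_map.mp hmem
  have hv0 : 0 ≤ v := by rw [← hs0]; positivity
  have hml : pvMaxLen cs = v.toNat := by unfold pvMaxLen; rw [hv]; rfl
  constructor
  · rw [hv, hml]
    simp [Int.toNat_of_nonneg hv0]
  · intro s hs
    have := PySem.List.max?_isMax hv ((s.length : Int)) (List.mem_map_of_mem hs)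
    simp only [id] at this
    omega

theorem pv_negget (s : String) (k : Nat) (hle : k + 1 ≤ s.toList.length) :
    (PySem.Str.pyGet? s (-(1 + (k:Int)))).getD ' ' = s.toList.getD (s.toList.length - (k+1)) ' ' := by
  have h1 : (-(1 + (k:Int))) = -(((k+1 : Nat)) : Int) := by push_cast; ring
  rw [PySem.Str.pyGet?_eq, PySem.Chars.pyGet?_eq_listPyGet?, h1,
    PySem.List.pyGet?_neg_natCast _ (k+1) (by omega) hle, ← List.getD_eq_getElem?_getD]

theorem pv_cond_eq (cs : List String) (k : Nat) (s : String) (_ : s ∈ cs.dropLast) :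
    (decide ((1:Int) + (k:Int) ≤ PySem.Str.len s) &&
        !(PySem.Chars.strip [(PySem.Str.pyGet? s (-(1 + (k:Int)))).getD ' ']).isEmpty)
      = (decide (k + 1 ≤ s.toList.length) &&
        !PySem.Chars.isspace (s.toList.getD (s.toList.length - (k+1)) ' ')) := by
  have hdec : decide ((1:Int) + (k:Int) ≤ PySem.Str.len s) = decide (k + 1 ≤ s.toList.length) := by
    rw [decide_eq_decide, PySem.Str.len_eq]
    omega
  rw [hdec]
  by_cases hle : k + 1 ≤ s.toList.length
  · rw [pv_negget s k hle, pv_strip_singleton_isEmpty]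
  · have hd2 : decide (k + 1 ≤ s.toList.length) = false := decide_eq_false hle
    rw [hd2, Bool.false_and, Bool.false_and]

theorem pv_chars_eq (cs : List String) (k : Nat) :
    List.foldl (fun a s =>
        if (decide ((1:Int) + (k:Int) ≤ PySem.Str.len s) &&
            !(PySem.Chars.strip [(PySem.Str.pyGet? s (-(1 + (k:Int)))).getD ' ']).isEmpty) = true
        then a ++ [(PySem.Str.pyGet? s (-(1 + (k:Int)))).getD ' '] else a) [] cs.dropLast
      = pvColumn (pvSegsL cs) (k + 1) := by
  rw [PySem.List.foldl_append_if]
  unfold pvColumn pvSegsL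
  rw [List.filter_map, List.map_map, List.nil_append]
  rw [List.filter_congr (fun s hs => pv_cond_eq cs k s hs)]
  apply List.map_congr_left
  intro s hs
  have hp := (List.mem_filter.mp hs).2
  have hle : k + 1 ≤ s.toList.length := by
    rcases Bool.and_eq_true_iff.mp hp with ⟨h1, _⟩
    exact of_decide_eq_true h1
  exact pv_negget s k hle

theorem pv_strip_column (segs : List (List Char)) (off : Nat) :
    PySem.Chars.strip (pvColumn segs off) = pvColumn segs off := by
  apply pv_strip_eq_self
  intro c hc
  obtain ⟨s, hs, hcs⟩ := List.mem_map.mp hc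
  have hp := (List.mem_filter.mp hs).2
  rcases Bool.and_eq_true_iff.mp hp with ⟨_, h2⟩
  rw [← hcs]
  simpa using h2

-- A computes, per right-to-left offset 1 .. max_len, the (optional) column number
theorem pv_A_eq (cs : List String) (h2 : 2 ≤ cs.length) :
    decode_vertical_num cs
      = pvCalculate ((List.range (pvMaxLen cs)).filterMap (fun k => pvG (pvSegsL cs) (k + 1)))
          (pvSign cs) := by
  obtain ⟨hmax, hlen⟩ := pv_maxLen_facts cs h2
  have hmapeq : (cs.dropLast).map (fun s => PySem.Str.len s) = (pvSegsL cs).map (fun s => (s.length : Int)) := by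
    simp [pvSegsL, List.map_map, Function.comp_def, PySem.Str.len_eq]
  simp only [decode_vertical_num, PySem.List.slice_to_neg_one]
  rw [hmapeq, hmax]
  rw [PySem.List.pyRange_one]
  have hm1 : ((((pvMaxLen cs : Nat) : Int) + 1 - 1)).toNat = pvMaxLen cs := by omega
  rw [hm1]
  rw [List.foldl_map]
  simp only [pv_chars_eq cs]
  simp only [pv_strip_column]
  rw [PySem.List.foldl_append_if, List.nil_append, ← pv_filterMap_ite]
  have hfun : (fun k => if (!(pvColumn (pvSegsL cs) (k+1)).isEmpty) = true
        then some ((PySem.Int.ofChars? (pvColumn (pvSegsL cs) (k+1))).getD 0) else none)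
      = fun k => pvG (pvSegsL cs) (k+1) := by
    funext k
    cases h : (pvColumn (pvSegsL cs) (k+1)).isEmpty <;> simp [pvG, h]
  rw [hfun]
  rfl

-- ===== B-side lemmas: the inverted index =====

-- the flat pair list, on the List-Char side
def pvSegPairs (s : List Char) : List (Int × Char) :=
  (PySem.List.enumerate s 0).filterMap (fun ic =>
    if !PySem.Chars.isspace ic.2 then some ((s.length : Int) - ic.1, ic.2) else none)

def pvPairs (cs : List String) : List (Int × Char) := (pvSegsL cs).flatMap pvSegPairs

theorem pv_port_pairs_eq (cs : List String) :
    (cs.dropLast).flatMap (fun s =>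
        (PySem.List.enumerate s.toList 0).filterMap (fun ic =>
          if (!(PySem.Chars.strip [ic.2]).isEmpty) = true then some (PySem.Str.len s - ic.1, ic.2) else none))
      = pvPairs cs := by
  unfold pvPairs pvSegsL
  rw [List.flatMap_map]
  apply List.flatMap_congr
  intro s _
  unfold pvSegPairs
  apply List.filterMap_congr
  intro ic _
  rw [pv_strip_singleton_isEmpty, PySem.Str.len_eq]

-- one segment's pairs, filtered at a key: at most the one character at that offset
theorem pv_segPairs_filter_aux (t : List Char) (k C off : Int) :
    List.map (fun p => p.2) (List.filter (fun p => p.1 == off)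
        ((PySem.List.enumerate t k).filterMap (fun ic =>
          if !PySem.Chars.isspace ic.2 then some (C - ic.1, ic.2) else none)))
      = if 0 ≤ C - off - k ∧ C - off - k < (t.length : Int) ∧
            ¬ PySem.Chars.isspace (t.getD (C - off - k).toNat ' ') = true
        then [t.getD (C - off - k).toNat ' '] else [] := by
  induction t generalizing k with
  | nil =>
    rw [if_neg (by rintro ⟨h1, h2, _⟩; simp at h2; omega)]
    simp [PySem.List.enumerate_nil]
  | cons c rest ih =>
    rw [PySem.List.enumerate_cons, List.filterMap_cons]
    have hstep := ih (k + 1)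
    cases hsp : PySem.Chars.isspace c with
    | true =>
      simp only [Bool.not_true, Bool.false_eq_true, if_false]
      rw [hstep]
      by_cases hc : 0 ≤ C - off - (k+1) ∧ C - off - (k+1) < (rest.length : Int) ∧
          ¬ PySem.Chars.isspace (rest.getD (C - off - (k+1)).toNat ' ') = true
      · obtain ⟨ha, hb, hns⟩ := hc
        have hidx : (C - off - k).toNat = (C - off - (k+1)).toNat + 1 := by omega
        rw [if_pos ⟨ha, hb, hns⟩, if_pos ⟨by omega, by simp; omega, by rw [hidx]; simpa using hns⟩]
        simp [hidx]
      · rw [if_neg hc, if_neg]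
        rintro ⟨ha, hb, hns⟩
        by_cases h0 : C - off - k = 0
        · have : (C - off - k).toNat = 0 := by omega
          rw [this] at hns
          simp [hsp] at hns
        · apply hc
          have hidx : (C - off - k).toNat = (C - off - (k+1)).toNat + 1 := by omega
          refine ⟨by omega, by simp at hb; omega, ?_⟩
          rw [hidx] at hns
          simpa using hns
    | false =>
      simp only [Bool.not_false, if_pos, List.filter_cons]
      by_cases hkey : C - k = off
      · have hkeyb : ((C - k == off)) = true := by simp [hkey]
        have h0 : C - off - k = 0 := by omega
        have hn0 : (C - off - k).toNat = 0 := by omega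
        have hrest : ¬ (0 ≤ C - off - (k+1) ∧ C - off - (k+1) < (rest.length : Int) ∧
            ¬ PySem.Chars.isspace (rest.getD (C - off - (k+1)).toNat ' ') = true) := by
          rintro ⟨ha, _, _⟩; omega
        simp only [hkeyb, if_true, List.map_cons, hstep, if_neg hrest]
        rw [if_pos ⟨by omega, by simp; omega, by rw [hn0]; simpa using hsp⟩]
        simp [hn0]
      · have hkeyb : ((C - k == off)) = false := by simp; omega
        simp only [hkeyb, Bool.false_eq_true, if_false, hstep]
        by_cases hc : 0 ≤ C - off - (k+1) ∧ C - off - (k+1) < (rest.length : Int) ∧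
            ¬ PySem.Chars.isspace (rest.getD (C - off - (k+1)).toNat ' ') = true
        · obtain ⟨ha, hb, hns⟩ := hc
          have hidx : (C - off - k).toNat = (C - off - (k+1)).toNat + 1 := by omega
          rw [if_pos ⟨ha, hb, hns⟩, if_pos ⟨by omega, by simp; omega, by rw [hidx]; simpa using hns⟩]
          simp [hidx]
        · rw [if_neg hc, if_neg]
          rintro ⟨ha, hb, hns⟩
          apply hc
          have h0 : C - off - k ≠ 0 := by omega
          have hidx : (C - off - k).toNat = (C - off - (k+1)).toNat + 1 := by omega
          refine ⟨by omega, by simp at hb; omega, ?_⟩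
          rw [hidx] at hns
          simpa using hns

-- the pairs at key (o : Int), read off in segment order, ARE the vertical column o
theorem pv_pairs_filter_eq_column (cs : List String) (o : Nat) (h1 : 1 ≤ o) :
    List.map (fun p => p.2) (List.filter (fun p => p.1 == (o : Int)) (pvPairs cs))
      = pvColumn (pvSegsL cs) o := by
  unfold pvPairs pvColumn
  rw [List.filter_flatMap, List.map_flatMap, pv_filter_map_eq_flatMap]
  apply List.flatMap_congr
  intro s _
  unfold pvSegPairs
  rw [pv_segPairs_filter_aux s 0 (s.length : Int) (o : Int)]
  by_cases hle : o ≤ s.length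
  · have hnn : (0:Int) ≤ (s.length : Int) - (o : Int) - 0 := by omega
    have hlt : (s.length : Int) - (o : Int) - 0 < (s.length : Int) := by omega
    have hidx : ((s.length : Int) - (o : Int) - 0).toNat = s.length - o := by omega
    by_cases hsp : PySem.Chars.isspace (s.getD (s.length - o) ' ') = true
    · rw [if_neg (by rw [hidx]; rintro ⟨_, _, h⟩; exact h hsp),
        if_neg (by simp [hle]; rw [← List.getD_eq_getElem?_getD]; exact hsp)]
    · rw [if_pos ⟨hnn, hlt, by rw [hidx]; exact hsp⟩,
        if_pos (by simp [hle]; rw [← List.getD_eq_getElem?_getD]; simpa using hsp), hidx]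
  · rw [if_neg (by rintro ⟨_, h, _⟩; omega), if_neg (by simp [hle])]

-- every key of the index is the offset of a non-empty column in 1 .. max_len, and conversely
theorem pv_key_mem_iff (cs : List String) (h2 : 2 ≤ cs.length) (x : Int) :
    x ∈ (pvPairs cs).map (fun p => p.1)
      ↔ ∃ o : Nat, x = (o : Int) ∧ 1 ≤ o ∧ o ≤ pvMaxLen cs ∧ pvColumn (pvSegsL cs) o ≠ [] := by
  obtain ⟨_, hlen⟩ := pv_maxLen_facts cs h2
  constructor
  · intro hx
    obtain ⟨p, hp, hpx⟩ := List.mem_map.mp hx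
    obtain ⟨s, hs, hps⟩ := List.mem_flatMap.mp hp
    obtain ⟨ic, hic, hicp⟩ := List.mem_filterMap.mp hps
    by_cases hsp : (!PySem.Chars.isspace ic.2) = true
    · rw [if_pos hsp] at hicp
      rw [PySem.List.mem_enumerate_iff] at hic
      obtain ⟨i, hi, hie⟩ := hic
      have hic1 : ic.1 = (i : Int) := by rw [hie]; simp
      have hpe : p = ((s.length : Int) - ic.1, ic.2) := (Option.some.inj hicp).symm
      have hx' : x = (s.length : Int) - (i : Int) := by
        rw [← hpx, hpe]
        simp [hic1]
      refine ⟨s.length - i, by omega, by omega, by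
        have := hlen s hs; omega, ?_⟩
      have hcol := pv_pairs_filter_eq_column cs (s.length - i) (by omega)
      intro hnil
      rw [hnil] at hcol
      have hpmem : p ∈ (pvPairs cs).filter (fun q => q.1 == ((s.length - i : Nat) : Int)) := by
        refine List.mem_filter.mpr ⟨List.mem_flatMap.mpr ⟨s, hs, hps⟩, ?_⟩
        simp only [beq_iff_eq, hpx, hx']
        omega
      have : p.2 ∈ ([] : List Char) := by
        rw [← hcol]; exact List.mem_map_of_mem hpmem
      simp at this
    · rw [if_neg hsp] at hicp
      simp at hicp
  · rintro ⟨o, rfl, h1, _, hne⟩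
    obtain ⟨c, hc⟩ := List.exists_mem_of_ne_nil _ hne
    rw [← pv_pairs_filter_eq_column cs o h1] at hc
    obtain ⟨p, hp, _⟩ := List.mem_map.mp hc
    have := List.mem_filter.mp hp
    refine List.mem_map.mpr ⟨p, this.1, ?_⟩
    simpa using this.2

-- A's offset list (as Nats): the non-empty columns 1 .. max_len, right to left
def pvOffs (cs : List String) : List Nat :=
  (List.range (pvMaxLen cs)).filterMap (fun k =>
    if pvColumn (pvSegsL cs) (k + 1) = [] then none else some (k + 1))

theorem pv_offs_nodup (cs : List String) : (pvOffs cs).Nodup := by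
  refine List.Nodup.filterMap ?_ List.nodup_range
  intro a b x ha hb
  split at ha
  · simp at ha
  · split at hb
    · simp at hb
    · simp at ha hb
      omega

theorem pv_mem_offs (cs : List String) (o : Nat) :
    o ∈ pvOffs cs ↔ 1 ≤ o ∧ o ≤ pvMaxLen cs ∧ pvColumn (pvSegsL cs) o ≠ [] := by
  unfold pvOffs
  constructor
  · intro h
    obtain ⟨k, hk, hko⟩ := List.mem_filterMap.mp h
    split at hko
    · simp at hko
    · obtain rfl : k + 1 = o := by simpa using hko
      exact ⟨by omega, by have := List.mem_range.mp hk; omega, by assumption⟩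
  · rintro ⟨h1, hm, hne⟩
    refine List.mem_filterMap.mpr ⟨o - 1, List.mem_range.mpr (by omega), ?_⟩
    have : o - 1 + 1 = o := by omega
    rw [this, if_neg hne]

-- A's nums list is the column numbers over pvOffs
theorem pv_A_nums_eq (cs : List String) :
    (List.range (pvMaxLen cs)).filterMap (fun k => pvG (pvSegsL cs) (k + 1))
      = (pvOffs cs).map (fun o => (PySem.Int.ofChars? (pvColumn (pvSegsL cs) o)).getD 0) := by
  unfold pvOffs
  rw [List.map_filterMap]
  apply List.filterMap_congr
  intro k _
  by_cases h : pvColumn (pvSegsL cs) (k + 1) = [] <;>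
    simp [pvG, h, List.isEmpty_iff]

theorem pv_calculate_perm (l l' : List Int) (h : l.Perm l') (sign : String) :
    pvCalculate l sign = pvCalculate l' sign := by
  unfold pvCalculate
  split
  · exact h.prod_eq
  · exact h.sum_eq

-- B equals A's value: the dict's values are a permutation of A's column numbers
theorem pv_B_eq (cs : List String) (h2 : 2 ≤ cs.length) :
    decode_vertical_num_alt cs
      = pvCalculate ((List.range (pvMaxLen cs)).filterMap (fun k => pvG (pvSegsL cs) (k + 1)))
          (pvSign cs) := by
  simp only [decode_vertical_num_alt, pv_port_pairs_eq]
  set KI : List Int := (pvPairs cs).foldl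
      (fun d p => d.modify p.1 [] (fun v => v ++ [p.2])) (PySem.Dict.empty : PySem.Dict Int (List Char)) |>.keys
    with hKI
  have hkeys : KI = PySem.Set.ofList ((pvPairs cs).map (fun p => p.1)) := by
    rw [hKI, PySem.Dict.keys_foldl_modify_key (pvPairs cs) (fun p => p.1) []
      (fun _ p => (fun v => v ++ [p.2]))]
    simp [PySem.Set.update_nil_left]
  have hnodupKI : KI.Nodup := by
    rw [hkeys]; exact PySem.Set.nodup_ofList _
  have hmemKI : ∀ x, x ∈ KI ↔
      ∃ o : Nat, x = (o : Int) ∧ 1 ≤ o ∧ o ≤ pvMaxLen cs ∧ pvColumn (pvSegsL cs) o ≠ [] := by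
    intro x
    rw [hkeys, PySem.Set.mem_ofList]
    exact pv_key_mem_iff cs h2 x
  have hvals : ((pvPairs cs).foldl (fun d p => d.modify p.1 [] (fun v => v ++ [p.2]))
        (PySem.Dict.empty : PySem.Dict Int (List Char))).values
      = KI.map (fun k => ((pvPairs cs).filter (fun p => p.1 == k)).map (fun p => p.2)) := by
    rw [PySem.Dict.values_eq_map_keys _ (by rw [← hKI]; exact hnodupKI) []]
    rw [← hKI]
    apply List.map_congr_left
    intro k _
    rw [PySem.Dict.getD_foldl_modify_append (pvPairs cs) PySem.Dict.empty k]
    simp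
  -- the keys, as Int-cast Nats, are a permutation of A's offsets
  have hperm : KI.Perm (List.map (fun o : Nat => (o : Int)) (pvOffs cs)) := by
    rw [List.perm_ext_iff_of_nodup hnodupKI
      ((pv_offs_nodup cs).map (fun a b h => by exact_mod_cast h))]
    intro x
    rw [hmemKI, List.mem_map]
    constructor
    · rintro ⟨o, rfl, h1, hm, hne⟩
      exact ⟨o, (pv_mem_offs cs o).mpr ⟨h1, hm, hne⟩, rfl⟩
    · rintro ⟨o, ho, rfl⟩
      obtain ⟨h1, hm, hne⟩ := (pv_mem_offs cs o).mp ho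
      exact ⟨o, rfl, h1, hm, hne⟩
  rw [hvals, pv_A_nums_eq cs]
  have hmapscomm :
      (KI.map (fun k => ((pvPairs cs).filter (fun p => p.1 == k)).map (fun p => p.2))).map
          (fun chars => (PySem.Int.ofChars? chars).getD 0)
        = KI.map (fun k =>
            (PySem.Int.ofChars? (((pvPairs cs).filter (fun p => p.1 == k)).map (fun p => p.2))).getD 0) := by
    rw [List.map_map]; rfl
  rw [hmapscomm]
  have hcongr : KI.map (fun k =>
        (PySem.Int.ofChars? (((pvPairs cs).filter (fun p => p.1 == k)).map (fun p => p.2))).getD 0)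
      = KI.map (fun k => (PySem.Int.ofChars? (pvColumn (pvSegsL cs) k.toNat)).getD 0) := by
    apply List.map_congr_left
    intro k hk
    obtain ⟨o, rfl, h1, _, _⟩ := (hmemKI k).mp hk
    rw [show ((o : Int)).toNat = o by omega, pv_pairs_filter_eq_column cs o h1]
  rw [hcongr]
  have hperm2 := hperm.map (fun k : Int => (PySem.Int.ofChars? (pvColumn (pvSegsL cs) k.toNat)).getD 0)
  rw [List.map_map] at hperm2
  have hco : ((fun k : Int => (PySem.Int.ofChars? (pvColumn (pvSegsL cs) k.toNat)).getD 0) ∘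
        (fun o : Nat => (o : Int)))
      = fun o : Nat => (PySem.Int.ofChars? (pvColumn (pvSegsL cs) o)).getD 0 := by
    funext o
    simp
  rw [hco] at hperm2
  exact pv_calculate_perm _ _ hperm2 (pvSign cs)

-- ===== VERDICT (by name: the statement is the Claim_ definition above) =====
theorem decode_vertical_num_spec : Claim_equal_decode_vertical_num := by
  intro cs _ hpre
  unfold Spec_decode_vertical_num
  rw [pv_A_eq cs hpre.1, pv_B_eq cs hpre.1]
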